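-- pv_equiv track=rewrite | github.com/etherealwei/LC | leetcode_1.py | countOfPairs1
-- ===== SOURCE A (Python) =====
-- from typing import List
--
-- def countOfPairs1(nums: List[int]) -> int:
--     if not nums: return 0
--     # 2, 3, 2 -> [[0, 1], [0, 1, 2], [0, 1]]
--     # DP[i][n][m] means how many subarrays there are that satisify arr1[i] + arr2[i] == nums[i] and arr1[i + 1] >= arr1[i] = n and arr2[i + 1] <= arr2[i] = m
--     max_nums = max(nums)
--     dp = [[0 for _ in range(max_nums + 1)] for _ in range(max_nums + 1)]
--
--     for i in range(len(nums) - 1, -1, -1):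
--         new_dp = [[0 for _ in range(max_nums + 1)] for _ in range(max_nums + 1)]
--         for j in range(nums[i], -1, -1):
--             if i == len(nums) - 1:
--                 new_dp[j][nums[i] - j] += 1
--                 continue
--             # nums[i + 1] - sub_j <= nums[i] - j
--             for sub_j in range(max(j, nums[i + 1] - nums[i] + j), nums[i + 1] + 1):
--                 new_dp[j][nums[i] - j] += dp[sub_j][nums[i + 1] - sub_j]
--         dp = new_dp
--
--     total = 0
--     for j in range(nums[0] + 1):
--         total += dp[j][nums[0] - j]
--     return total % (10 ** 9 + 7)
-- ===== SOURCE B (Python) =====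
-- from typing import List
--
-- def countOfPairs1(nums: List[int]) -> int:
--     # 1D DP over arr1-values with prefix sums for the range-sum transition.
--     if not nums:
--         return 0
--     last = nums[-1]
--     f = [1] * (last + 1) if last >= 0 else []   # f[j]: ways for the suffix with arr1 = j
--     for i in range(len(nums) - 2, -1, -1):
--         cur, nxt = nums[i], nums[i + 1]
--         prefix = [0]
--         for v in f:
--             prefix.append(prefix[-1] + v)
--         g = []
--         for j in range(cur + 1):
--             lo = max(j, nxt - cur + j)
--             g.append(prefix[nxt + 1] - prefix[lo] if lo <= nxt else 0)
--         f = g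
--     return sum(f) % (10 ** 9 + 7)
-- ===== Notes on version B (the rewrite author's own statement) =====
-- stated objective: faster
-- what changed: Replaced the (M+1)x(M+1) matrix DP with inner range-sum loops by a 1D list over arr1-values recomputed right-to-left, with a prefix-sum array so each transition is O(1) instead of an inner scan.
import Mathlib
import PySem

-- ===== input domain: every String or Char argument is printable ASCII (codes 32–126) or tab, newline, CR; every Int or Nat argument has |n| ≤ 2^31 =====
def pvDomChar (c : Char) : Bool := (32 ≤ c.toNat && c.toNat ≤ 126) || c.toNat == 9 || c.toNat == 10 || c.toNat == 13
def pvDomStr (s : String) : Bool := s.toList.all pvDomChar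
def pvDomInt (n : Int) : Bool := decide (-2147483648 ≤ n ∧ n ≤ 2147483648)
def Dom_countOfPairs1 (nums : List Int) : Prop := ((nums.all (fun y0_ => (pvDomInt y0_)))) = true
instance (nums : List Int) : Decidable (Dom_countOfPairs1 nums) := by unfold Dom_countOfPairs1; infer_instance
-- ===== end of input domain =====

-- B collapses A's (M+1)x(M+1) matrix DP with inner range-sum scans to a 1D list over
-- arr1-values with a prefix-sum array (objective: faster, asymptotic).


-- ===== PORT A =====
-- dp[j][k] read with Python default-free indexing; all indices A uses are in range,
-- so the total pyGetD/pySetD forms are exact here.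
def pvGet2 (dp : List (List Int)) (j k : Int) : Int :=
  PySem.List.pyGetD (PySem.List.pyGetD dp j []) k 0

-- dp[j][k] += v
def pvIncr2 (dp : List (List Int)) (j k v : Int) : List (List Int) :=
  PySem.List.pySetD dp j
    (PySem.List.pySetD (PySem.List.pyGetD dp j []) k (pvGet2 dp j k + v))

def countOfPairs1 (nums : List Int) : Int :=
  if nums = [] then 0 else
  let n : Int := nums.length
  let max_nums : Int := (PySem.List.max? nums (fun x => x)).getD 0
  let dp0 : List (List Int) :=
    (PySem.List.pyRange 0 (max_nums + 1) 1).map (fun _ =>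
      (PySem.List.pyRange 0 (max_nums + 1) 1).map (fun _ => (0 : Int)))
  let dp := (PySem.List.pyRange (n - 1) (-1) (-1)).foldl (fun dp i =>
    let new_dp0 : List (List Int) :=
      (PySem.List.pyRange 0 (max_nums + 1) 1).map (fun _ =>
        (PySem.List.pyRange 0 (max_nums + 1) 1).map (fun _ => (0 : Int)))
    (PySem.List.pyRange (PySem.List.pyGetD nums i 0) (-1) (-1)).foldl (fun nd j =>
      if i = n - 1 then
        pvIncr2 nd j (PySem.List.pyGetD nums i 0 - j) 1
      else
        (PySem.List.pyRange
            (max j (PySem.List.pyGetD nums (i + 1) 0 - PySem.List.pyGetD nums i 0 + j))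
            (PySem.List.pyGetD nums (i + 1) 0 + 1) 1).foldl (fun nd2 sub_j =>
          pvIncr2 nd2 j (PySem.List.pyGetD nums i 0 - j)
            (pvGet2 dp sub_j (PySem.List.pyGetD nums (i + 1) 0 - sub_j))) nd) new_dp0) dp0
  let total := (PySem.List.pyRange 0 (PySem.List.pyGetD nums 0 0 + 1) 1).foldl
    (fun t j => t + pvGet2 dp j (PySem.List.pyGetD nums 0 0 - j)) 0
  total % (10 ^ 9 + 7)

-- ===== PORT B =====
def countOfPairs1_alt (nums : List Int) : Int :=
  if nums = [] then 0 else
  let last := PySem.List.pyGetD nums (-1) 0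
  let f0 : List Int := if 0 ≤ last then List.replicate (last + 1).toNat 1 else []
  let f := (PySem.List.pyRange ((nums.length : Int) - 2) (-1) (-1)).foldl (fun f i =>
    let cur := PySem.List.pyGetD nums i 0
    let nxt := PySem.List.pyGetD nums (i + 1) 0
    let pre := f.foldl (fun p v => p ++ [PySem.List.pyGetD p (-1) 0 + v]) [(0 : Int)]
    (PySem.List.pyRange 0 (cur + 1) 1).foldl (fun g j =>
      let lo := max j (nxt - cur + j)
      g ++ [if lo ≤ nxt then PySem.List.pyGetD pre (nxt + 1) 0 - PySem.List.pyGetD pre lo 0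
            else 0]) []) f0
  (f.foldl (· + ·) 0) % (10 ^ 9 + 7)

-- ===== PRECONDITION & SPEC =====
def Spec_countOfPairs1 (nums : List Int) (out : Int) : Prop := out = countOfPairs1_alt nums
instance (nums : List Int) (out : Int) : Decidable (Spec_countOfPairs1 nums out) := by unfold Spec_countOfPairs1; infer_instance

-- ===== CLAIM (what is proved, stated in full; the proofs are below) =====
def Claim_equal_countOfPairs1 : Prop := ∀ (nums : List Int), Dom_countOfPairs1 nums → Spec_countOfPairs1 nums (countOfPairs1 nums)

-- ===== LEMMAS AND PROOFS =====

-- number of valid (arr1, arr2) completions of the suffix s with arr1-start value j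
def pvW : List Int → Int → Int
  | [], _ => 0
  | [x], j => if 0 ≤ j ∧ j ≤ x then 1 else 0
  | x :: y :: rest, j =>
    if 0 ≤ j ∧ j ≤ x then
      ((PySem.List.pyRange (max j (y - x + j)) (y + 1) 1).map (pvW (y :: rest))).sum
    else 0
termination_by s _ => s.length

-- the 1D value vector for a suffix
def pvFs : List Int → List Int
  | [] => []
  | x :: rest => (PySem.List.pyRange 0 (x + 1) 1).map (pvW (x :: rest))

def pvShape (m : Int) (dp : List (List Int)) : Prop :=
  dp.length = (m + 1).toNat ∧ ∀ row ∈ dp, row.length = (m + 1).toNat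

def pvZeros (m : Int) : List (List Int) :=
  (PySem.List.pyRange 0 (m + 1) 1).map (fun _ =>
    (PySem.List.pyRange 0 (m + 1) 1).map (fun _ => (0 : Int)))

theorem pyGet?_mem {α : Type} {xs : List α} {i : Int} {v : α}
    (h : PySem.List.pyGet? xs i = some v) : v ∈ xs := by
  simp only [PySem.List.pyGet?] at h
  cases hk : PySem.List.pyIdx? xs.length i with
  | none => rw [hk] at h; simp at h
  | some k =>
    rw [hk] at h
    simp only [Option.bind_some] at h
    exact List.mem_of_getElem? h

theorem pyGetD_mem_or {α : Type} (xs : List α) (i : Int) (d : α) :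
    PySem.List.pyGetD xs i d ∈ xs ∨ PySem.List.pyGetD xs i d = d := by
  simp only [PySem.List.pyGetD]
  cases hq : PySem.List.pyGet? xs i with
  | none => right; rfl
  | some v => left; exact pyGet?_mem hq

theorem shape_zeros (m : Int) : pvShape m (pvZeros m) := by
  constructor
  · simp [pvZeros, PySem.List.length_pyRange_one]
  · intro row hrow
    simp only [pvZeros, List.mem_map] at hrow
    obtain ⟨a, _, rfl⟩ := hrow
    simp [PySem.List.length_pyRange_one]

theorem get2_zeros (m a b : Int) : pvGet2 (pvZeros m) a b = 0 := by
  unfold pvGet2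
  set r := PySem.List.pyGetD (pvZeros m) a [] with hr
  rcases pyGetD_mem_or (pvZeros m) a [] with hm | hm
  · rw [← hr] at hm
    simp only [pvZeros, List.mem_map] at hm
    obtain ⟨c, _, hc⟩ := hm
    rcases pyGetD_mem_or r b 0 with h2 | h2
    · rw [← hc] at h2 ⊢
      simp only [List.mem_map] at h2
      obtain ⟨_, _, h⟩ := h2
      exact h.symm
    · exact h2
  · rw [← hr] at hm
    rw [hm]
    rcases pyGetD_mem_or ([] : List Int) b 0 with h2 | h2
    · simp at h2
    · exact h2

theorem shape_incr2 (m : Int) (dp : List (List Int)) (j k v : Int) (hj : 0 ≤ j) (hk : 0 ≤ k)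
    (h : pvShape m dp) : pvShape m (pvIncr2 dp j k v) := by
  obtain ⟨hlen, hrows⟩ := h
  unfold pvIncr2
  rw [PySem.List.pySetD_of_nonneg _ _ hj, PySem.List.pySetD_of_nonneg _ _ hk]
  refine ⟨by simpa using hlen, ?_⟩
  intro row hrow
  rcases List.mem_or_eq_of_mem_set hrow with h1 | h1
  · exact hrows _ h1
  · by_cases hlt : j.toNat < dp.length
    · subst h1
      rw [List.length_set]
      rw [PySem.List.pyGetD_of_nonneg _ _ hj, List.getD_eq_getElem?_getD,
          List.getElem?_eq_getElem hlt]
      exact hrows _ (List.getElem_mem hlt)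
    · rw [List.set_eq_of_length_le (by omega)] at hrow
      exact hrows _ hrow

theorem get2_incr2 (m : Int) (dp : List (List Int)) (j k v a b : Int)
    (hdp : pvShape m dp) (hj0 : 0 ≤ j) (hjm : j ≤ m) (hk0 : 0 ≤ k) (hkm : k ≤ m)
    (ha : 0 ≤ a) (hb : 0 ≤ b) :
    pvGet2 (pvIncr2 dp j k v) a b =
      pvGet2 dp a b + (if a = j ∧ b = k then v else 0) := by
  obtain ⟨hlen, hrows⟩ := hdp
  have hm : 0 ≤ m := le_trans hj0 hjm
  have hjlt : j.toNat < dp.length := by omega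
  have hrowlen : dp[j.toNat].length = (m + 1).toNat := hrows _ (List.getElem_mem hjlt)
  have hklt : k.toNat < dp[j.toNat].length := by omega
  have hrowD : PySem.List.pyGetD dp j [] = dp[j.toNat] := by
    rw [PySem.List.pyGetD_of_nonneg _ _ hj0, List.getD_eq_getElem?_getD,
        List.getElem?_eq_getElem hjlt, Option.getD_some]
  simp only [pvIncr2, pvGet2, hrowD,
    PySem.List.pySetD_of_nonneg _ _ hj0, PySem.List.pySetD_of_nonneg _ _ hk0,
    PySem.List.pyGetD_of_nonneg _ _ ha, PySem.List.pyGetD_of_nonneg _ _ hb,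
    PySem.List.pyGetD_of_nonneg _ _ hk0,
    List.getD_eq_getElem?_getD, List.getElem?_set]
  by_cases haj : a = j
  · subst haj
    rw [if_pos rfl, if_pos hjlt]
    simp only [Option.getD_some, List.getElem?_set]
    by_cases hbk : b = k
    · subst hbk
      rw [if_pos rfl, if_pos hklt]
      simp [List.getElem?_eq_getElem hjlt]
    · rw [if_neg (by omega : ¬ k.toNat = b.toNat)]
      simp [hbk, List.getElem?_eq_getElem hjlt]
  · rw [if_neg (by omega : ¬ j.toNat = a.toNat)]
    simp [haj]

-- the inner sub_j loop: repeated += at one fixed cell adds the range sum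
theorem foldl_incr2 (m : Int) (l : List Int) (h : Int → Int) (j k : Int)
    (hj0 : 0 ≤ j) (hjm : j ≤ m) (hk0 : 0 ≤ k) (hkm : k ≤ m) :
    ∀ (dp : List (List Int)), pvShape m dp →
      pvShape m (l.foldl (fun nd s => pvIncr2 nd j k (h s)) dp) ∧
      ∀ a b, 0 ≤ a → 0 ≤ b →
        pvGet2 (l.foldl (fun nd s => pvIncr2 nd j k (h s)) dp) a b =
          pvGet2 dp a b + (if a = j ∧ b = k then (l.map h).sum else 0) := by
  induction l with
  | nil =>
    intro dp hdp
    refine ⟨hdp, ?_⟩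
    intro a b _ _
    simp
  | cons s t ih =>
    intro dp hdp
    simp only [List.foldl_cons]
    obtain ⟨hsh, hget⟩ := ih (pvIncr2 dp j k (h s)) (shape_incr2 m dp j k _ hj0 hk0 hdp)
    refine ⟨hsh, ?_⟩
    intro a b ha hb
    rw [hget a b ha hb, get2_incr2 m dp j k (h s) a b hdp hj0 hjm hk0 hkm ha hb]
    by_cases hc : a = j ∧ b = k
    · simp only [if_pos hc, List.map_cons, List.sum_cons]
      ring
    · simp [hc]

-- the j loop: each j writes its own cell (j, x - j)
theorem jloop (m x : Int) (step : List (List Int) → Int → List (List Int)) (T : Int → Int)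
    (hstep : ∀ nd j, 0 ≤ j → j ≤ x → pvShape m nd →
      pvShape m (step nd j) ∧
      ∀ a b, 0 ≤ a → 0 ≤ b →
        pvGet2 (step nd j) a b = pvGet2 nd a b + (if a = j ∧ b = x - j then T j else 0)) :
    ∀ (c : Nat) (j0 : Int), (j0 + 1).toNat = c → j0 ≤ x →
    ∀ nd, pvShape m nd →
    (∀ a b, 0 ≤ a → 0 ≤ b →
        pvGet2 nd a b = if j0 < a ∧ a ≤ x ∧ b = x - a then T a else 0) →
    pvShape m ((PySem.List.pyRange j0 (-1) (-1)).foldl step nd) ∧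
    ∀ a b, 0 ≤ a → 0 ≤ b →
      pvGet2 ((PySem.List.pyRange j0 (-1) (-1)).foldl step nd) a b =
        if a ≤ x ∧ b = x - a then T a else 0 := by
  intro c
  induction c with
  | zero =>
    intro j0 hc hj0x nd hsh hinv
    rw [PySem.List.pyRange_neg_one_eq_nil (by omega : j0 ≤ -1)]
    refine ⟨hsh, ?_⟩
    intro a b ha hb
    simp only [List.foldl_nil]
    rw [hinv a b ha hb]
    by_cases h1 : a ≤ x ∧ b = x - a
    · rw [if_pos ⟨by omega, h1.1, h1.2⟩, if_pos h1]
    · rw [if_neg (show ¬(j0 < a ∧ a ≤ x ∧ b = x - a) from fun hcc => h1 ⟨hcc.2.1, hcc.2.2⟩),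
          if_neg h1]
  | succ c ih =>
    intro j0 hc hj0x nd hsh hinv
    have hj0 : 0 ≤ j0 := by omega
    rw [PySem.List.pyRange_neg_one_cons (by omega : (-1 : Int) < j0)]
    simp only [List.foldl_cons]
    obtain ⟨hsh', heff⟩ := hstep nd j0 hj0 hj0x hsh
    apply ih (j0 - 1) (by omega) (by omega) _ hsh'
    intro a b ha hb
    rw [heff a b ha hb, hinv a b ha hb]
    rcases eq_or_ne a j0 with rfl | hne
    · by_cases hb1 : b = x - a
      · subst hb1
        rw [if_pos (show a = a ∧ x - a = x - a from ⟨rfl, rfl⟩),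
            if_neg (show ¬(a < a ∧ a ≤ x ∧ x - a = x - a) by omega),
            if_pos (show a - 1 < a ∧ a ≤ x ∧ x - a = x - a from ⟨by omega, hj0x, rfl⟩)]
        simp
      · rw [if_neg (show ¬(a = a ∧ b = x - a) from fun hcc => hb1 hcc.2),
            if_neg (show ¬(a < a ∧ a ≤ x ∧ b = x - a) by omega),
            if_neg (show ¬(a - 1 < a ∧ a ≤ x ∧ b = x - a) from fun hcc => hb1 hcc.2.2)]
        simp
    · rw [if_neg (show ¬(a = j0 ∧ b = x - j0) from fun hcc => hne hcc.1)]
      by_cases hc2 : j0 < a ∧ a ≤ x ∧ b = x - a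
      · rw [if_pos hc2, if_pos (show j0 - 1 < a ∧ a ≤ x ∧ b = x - a from ⟨by omega, hc2.2⟩)]
        simp
      · rw [if_neg hc2,
            if_neg (show ¬(j0 - 1 < a ∧ a ≤ x ∧ b = x - a) by
              intro hcc; exact hc2 ⟨by omega, hcc.2⟩)]
        simp

theorem iloop (nums : List Int) (m : Int) (hne : nums ≠ [])
    (hmax : ∀ v ∈ nums, v ≤ m) :
    ∀ (c : Nat) (i0 : Int), (i0 + 1).toNat = c → i0 ≤ (nums.length : Int) - 1 →
    ∀ dp, pvShape m dp →
    (i0 = (nums.length : Int) - 1 ∨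
      (∀ a b, 0 ≤ a → 0 ≤ b →
        pvGet2 dp a b =
          if a ≤ (nums.drop (i0 + 1).toNat).headI ∧ b = (nums.drop (i0 + 1).toNat).headI - a
          then pvW (nums.drop (i0 + 1).toNat) a else 0)) →
    (∀ a b, 0 ≤ a → 0 ≤ b →
      pvGet2 ((PySem.List.pyRange i0 (-1) (-1)).foldl
        (fun dp i =>
          (PySem.List.pyRange (PySem.List.pyGetD nums i 0) (-1) (-1)).foldl
            (fun nd j =>
              if i = (nums.length : Int) - 1 then
                pvIncr2 nd j (PySem.List.pyGetD nums i 0 - j) 1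
              else
                (PySem.List.pyRange
                    (max j (PySem.List.pyGetD nums (i + 1) 0 - PySem.List.pyGetD nums i 0 + j))
                    (PySem.List.pyGetD nums (i + 1) 0 + 1) 1).foldl
                  (fun nd2 sub_j =>
                    pvIncr2 nd2 j (PySem.List.pyGetD nums i 0 - j)
                      (pvGet2 dp sub_j (PySem.List.pyGetD nums (i + 1) 0 - sub_j))) nd)
            (pvZeros m)) dp) a b =
        if a ≤ nums.headI ∧ b = nums.headI - a then pvW nums a else 0) := by
  intro c
  induction c with
  | zero =>
    intro i0 hc hi0n dp hsh hdisj
    rw [PySem.List.pyRange_neg_one_eq_nil (by omega : i0 ≤ -1)]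
    simp only [List.foldl_nil]
    have hlen : 0 < nums.length := List.length_pos_of_ne_nil hne
    rcases hdisj with h | h
    · exfalso; omega
    · have h0 : (i0 + 1).toNat = 0 := hc
      rw [h0] at h
      simpa using h
  | succ c ih =>
    intro i0 hc hi0n dp hsh hdisj
    have hi0 : 0 ≤ i0 := by omega
    have hi0lt : i0.toNat < nums.length := by omega
    have hx : PySem.List.pyGetD nums i0 0 = nums[i0.toNat] := by
      rw [PySem.List.pyGetD_of_nonneg _ _ hi0, List.getD_eq_getElem?_getD,
          List.getElem?_eq_getElem hi0lt, Option.getD_some]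
    have hxm : nums[i0.toNat] ≤ m := hmax _ (List.getElem_mem hi0lt)
    have hsdrop : nums.drop i0.toNat = nums[i0.toNat] :: nums.drop (i0.toNat + 1) :=
      (List.getElem_cons_drop hi0lt).symm
    rw [PySem.List.pyRange_neg_one_cons (by omega : (-1 : Int) < i0)]
    simp only [List.foldl_cons]
    -- one outer iteration: the j loop fills the matrix for suffix i0
    have hjl :
        pvShape m ((PySem.List.pyRange (PySem.List.pyGetD nums i0 0) (-1) (-1)).foldl
          (fun nd j =>
            if i0 = (nums.length : Int) - 1 then
              pvIncr2 nd j (PySem.List.pyGetD nums i0 0 - j) 1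
            else
              (PySem.List.pyRange
                  (max j (PySem.List.pyGetD nums (i0 + 1) 0 - PySem.List.pyGetD nums i0 0 + j))
                  (PySem.List.pyGetD nums (i0 + 1) 0 + 1) 1).foldl
                (fun nd2 sub_j =>
                  pvIncr2 nd2 j (PySem.List.pyGetD nums i0 0 - j)
                    (pvGet2 dp sub_j (PySem.List.pyGetD nums (i0 + 1) 0 - sub_j))) nd)
          (pvZeros m)) ∧
        ∀ a b, 0 ≤ a → 0 ≤ b →
          pvGet2 ((PySem.List.pyRange (PySem.List.pyGetD nums i0 0) (-1) (-1)).foldl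
            (fun nd j =>
              if i0 = (nums.length : Int) - 1 then
                pvIncr2 nd j (PySem.List.pyGetD nums i0 0 - j) 1
              else
                (PySem.List.pyRange
                    (max j (PySem.List.pyGetD nums (i0 + 1) 0 - PySem.List.pyGetD nums i0 0 + j))
                    (PySem.List.pyGetD nums (i0 + 1) 0 + 1) 1).foldl
                  (fun nd2 sub_j =>
                    pvIncr2 nd2 j (PySem.List.pyGetD nums i0 0 - j)
                      (pvGet2 dp sub_j (PySem.List.pyGetD nums (i0 + 1) 0 - sub_j))) nd)
            (pvZeros m)) a b =
            if a ≤ PySem.List.pyGetD nums i0 0 ∧ b = PySem.List.pyGetD nums i0 0 - a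
            then pvW (nums.drop i0.toNat) a else 0 := by
      apply jloop m (PySem.List.pyGetD nums i0 0) _ (pvW (nums.drop i0.toNat))
        ?_ ((PySem.List.pyGetD nums i0 0 + 1).toNat) _ rfl le_rfl
        (pvZeros m) (shape_zeros m)
      · intro a b ha hb
        rw [get2_zeros]
        rw [if_neg (by omega)]
      · -- the step at one j adds pvW (suffix) j to cell (j, x - j)
        intro nd j hj hjx hshnd
        by_cases hlast : i0 = (nums.length : Int) - 1
        · simp only [if_pos hlast]
          have hdropnil : nums.drop (i0.toNat + 1) = [] := by
            apply List.drop_eq_nil_of_le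
            omega
          refine ⟨shape_incr2 m nd j _ _ hj (by omega) hshnd, ?_⟩
          intro a b ha hb
          rw [get2_incr2 m nd j (PySem.List.pyGetD nums i0 0 - j) 1 a b hshnd hj
              (by rw [← hx] at hxm; omega) (by omega) (by rw [← hx] at hxm; omega) ha hb]
          congr 1
          rw [hsdrop, hdropnil]
          by_cases hcond : a = j ∧ b = PySem.List.pyGetD nums i0 0 - j
          · rw [if_pos hcond, if_pos hcond, pvW, if_pos ⟨hj, by rw [← hx]; exact hjx⟩]
          · rw [if_neg hcond, if_neg hcond]
        · simp only [if_neg hlast]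
          have hinv := hdisj.resolve_left hlast
          have hlt1 : i0.toNat + 1 < nums.length := by omega
          have hy : PySem.List.pyGetD nums (i0 + 1) 0 = nums[i0.toNat + 1] := by
            rw [PySem.List.pyGetD_of_nonneg _ _ (by omega : (0:Int) ≤ i0 + 1),
                List.getD_eq_getElem?_getD,
                show (i0 + 1).toNat = i0.toNat + 1 by omega,
                List.getElem?_eq_getElem hlt1, Option.getD_some]
          have hsdrop1 : nums.drop (i0.toNat + 1) = nums[i0.toNat + 1] :: nums.drop (i0.toNat + 2) :=
            (List.getElem_cons_drop hlt1).symm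
          have heq :=
            foldl_incr2 m
              (PySem.List.pyRange
                (max j (PySem.List.pyGetD nums (i0 + 1) 0 - PySem.List.pyGetD nums i0 0 + j))
                (PySem.List.pyGetD nums (i0 + 1) 0 + 1) 1)
              (fun sub_j => pvGet2 dp sub_j (PySem.List.pyGetD nums (i0 + 1) 0 - sub_j))
              j (PySem.List.pyGetD nums i0 0 - j)
              hj (by rw [← hx] at hxm; omega) (by omega) (by rw [← hx] at hxm; omega)
              nd hshnd
          refine ⟨heq.1, ?_⟩
          intro a b ha hb
          rw [heq.2 a b ha hb]
          congr 1
          have hmapeq :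
              (PySem.List.pyRange
                (max j (PySem.List.pyGetD nums (i0 + 1) 0 - PySem.List.pyGetD nums i0 0 + j))
                (PySem.List.pyGetD nums (i0 + 1) 0 + 1) 1).map
                (fun sub_j => pvGet2 dp sub_j (PySem.List.pyGetD nums (i0 + 1) 0 - sub_j)) =
              (PySem.List.pyRange
                (max j (PySem.List.pyGetD nums (i0 + 1) 0 - PySem.List.pyGetD nums i0 0 + j))
                (PySem.List.pyGetD nums (i0 + 1) 0 + 1) 1).map
                (pvW (nums.drop (i0.toNat + 1))) := by
            apply List.map_congr_left
            intro s hs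
            rw [PySem.List.mem_pyRange_one] at hs
            have hs0 : 0 ≤ s := le_trans (le_trans hj (le_max_left _ _)) hs.1
            have hsy : s ≤ PySem.List.pyGetD nums (i0 + 1) 0 := by omega
            rw [hinv s (PySem.List.pyGetD nums (i0 + 1) 0 - s) hs0 (by omega),
                show (i0 + 1).toNat = i0.toNat + 1 by omega]
            rw [hsdrop1]
            simp only [List.headI_cons]
            rw [if_pos ⟨by omega, by omega⟩]
          rw [hmapeq]
          by_cases hcond : a = j ∧ b = PySem.List.pyGetD nums i0 0 - j
          · rw [if_pos hcond, if_pos hcond]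
            rw [hsdrop, hsdrop1, pvW, if_pos ⟨hj, by rw [← hx]; exact hjx⟩, ← hsdrop1, hx, hy]
          · rw [if_neg hcond, if_neg hcond]
    -- now recurse on the remaining indices
    apply ih (i0 - 1) (by omega) (by omega) _ hjl.1
    right
    intro a b ha hb
    rw [show (i0 - 1 + 1).toNat = i0.toNat by omega]
    rw [hjl.2 a b ha hb, hsdrop]
    simp only [List.headI_cons]
    rw [hx]
    rfl

theorem countOfPairs1_unfold (nums : List Int) (hne : nums ≠ []) :
    countOfPairs1 nums =
      ((PySem.List.pyRange 0 (PySem.List.pyGetD nums 0 0 + 1) 1).foldl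
        (fun t j => t + pvGet2 ((PySem.List.pyRange ((nums.length : Int) - 1) (-1) (-1)).foldl
        (fun dp i =>
          (PySem.List.pyRange (PySem.List.pyGetD nums i 0) (-1) (-1)).foldl
            (fun nd j =>
              if i = (nums.length : Int) - 1 then
                pvIncr2 nd j (PySem.List.pyGetD nums i 0 - j) 1
              else
                (PySem.List.pyRange
                    (max j (PySem.List.pyGetD nums (i + 1) 0 - PySem.List.pyGetD nums i 0 + j))
                    (PySem.List.pyGetD nums (i + 1) 0 + 1) 1).foldl
                  (fun nd2 sub_j =>
                    pvIncr2 nd2 j (PySem.List.pyGetD nums i 0 - j)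
                      (pvGet2 dp sub_j (PySem.List.pyGetD nums (i + 1) 0 - sub_j))) nd)
            (pvZeros ((PySem.List.max? nums (fun x => x)).getD 0)))
        (pvZeros ((PySem.List.max? nums (fun x => x)).getD 0))) j (PySem.List.pyGetD nums 0 0 - j)) 0) % (10 ^ 9 + 7) := by
  rw [countOfPairs1, if_neg hne]
  rfl

theorem countOfPairs1_eq (nums : List Int) (hne : nums ≠ []) :
    countOfPairs1 nums = (pvFs nums).sum % (10 ^ 9 + 7) := by
  obtain ⟨x0, tl, rfl⟩ := List.exists_cons_of_ne_nil hne
  have hmaxs : ∀ v ∈ (x0 :: tl), v ≤ (PySem.List.max? (x0 :: tl) (fun x => x)).getD 0 := by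
    cases hq : PySem.List.max? (x0 :: tl) (fun x => x) with
    | none => exact absurd ((PySem.List.max?_eq_none_iff _ _).mp hq) hne
    | some mx => intro v hv; simpa using PySem.List.max?_isMax hq v hv
  have hfin := iloop (x0 :: tl) _ hne hmaxs (x0 :: tl).length (((x0 :: tl).length : Int) - 1)
      (by omega) (by omega) (pvZeros _) (shape_zeros _) (Or.inl rfl)
  rw [countOfPairs1_unfold _ hne, PySem.List.foldl_add, zero_add,
      show pvFs (x0 :: tl) = (PySem.List.pyRange 0 (x0 + 1) 1).map (pvW (x0 :: tl)) from rfl]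
  simp only [PySem.List.pyGetD_zero_cons]
  congr 1
  congr 1
  apply List.map_congr_left
  intro j hj
  rw [PySem.List.mem_pyRange_one] at hj
  rw [hfin j (x0 - j) (by omega) (by omega)]
  have hjx0 : j ≤ x0 := by omega
  simp [hjx0]

-- B side
theorem prefix_spec (f : List Int) :
    f.foldl (fun p v => p ++ [PySem.List.pyGetD p (-1) 0 + v]) [(0 : Int)] =
      (List.range (f.length + 1)).map (fun k => ((f.take k).sum : Int)) := by
  induction f using List.reverseRecOn with
  | nil => simp
  | append_singleton f' v ih =>
    rw [List.foldl_append, List.foldl_cons, List.foldl_nil, ih]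
    rw [show (List.range (f'.length + 1)).map (fun k => ((f'.take k).sum : Int)) =
          (List.range f'.length).map (fun k => ((f'.take k).sum : Int)) ++ [(f'.take f'.length).sum]
        by rw [List.range_succ, List.map_append, List.map_singleton]]
    rw [PySem.List.pyGetD_neg_one_append_singleton]
    rw [List.length_append, List.length_singleton]
    rw [List.range_succ, List.map_append, List.map_singleton,
        List.range_succ, List.map_append, List.map_singleton]
    rw [List.take_length]
    congr 1
    · congr 1
      · apply List.map_congr_left
        intro k hk
        rw [List.mem_range] at hk
        rw [List.take_append_of_le_length (by omega)]
      · rw [List.take_left' rfl]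
    · rw [List.take_of_length_le (by simp), List.sum_append, List.sum_cons, List.sum_nil]
      simp

theorem foldl_append_map_gen (r : List Int) (h : Int → Int) :
    ∀ acc : List Int, r.foldl (fun g j => g ++ [h j]) acc = acc ++ r.map h := by
  induction r with
  | nil => intro acc; simp
  | cons s t ih => intro acc; simp [ih]

theorem foldl_append_map (r : List Int) (h : Int → Int) :
    r.foldl (fun g j => g ++ [h j]) [] = r.map h := by
  simpa using foldl_append_map_gen r h []

theorem prefix_get (f : List Int) (i : Int) (h0 : 0 ≤ i) (hle : i ≤ (f.length : Int)) :
    PySem.List.pyGetD (f.foldl (fun p v => p ++ [PySem.List.pyGetD p (-1) 0 + v]) [(0 : Int)])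
      i 0 = (f.take i.toNat).sum := by
  rw [prefix_spec, PySem.List.pyGetD_of_nonneg _ _ h0, List.getD_eq_getElem?_getD,
      List.getElem?_eq_getElem (by simp; omega), Option.getD_some, List.getElem_map,
      List.getElem_range]

theorem bstep_spec (x y : Int) (rest : List Int) :
    (PySem.List.pyRange 0 (x + 1) 1).foldl (fun g j =>
      g ++ [if max j (y - x + j) ≤ y then
              PySem.List.pyGetD ((pvFs (y :: rest)).foldl
                  (fun p v => p ++ [PySem.List.pyGetD p (-1) 0 + v]) [(0 : Int)]) (y + 1) 0 -
              PySem.List.pyGetD ((pvFs (y :: rest)).foldl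
                  (fun p v => p ++ [PySem.List.pyGetD p (-1) 0 + v]) [(0 : Int)]) (max j (y - x + j)) 0
            else 0]) [] = pvFs (x :: y :: rest) := by
  rw [foldl_append_map _ (fun j =>
      if max j (y - x + j) ≤ y then
        PySem.List.pyGetD ((pvFs (y :: rest)).foldl
            (fun p v => p ++ [PySem.List.pyGetD p (-1) 0 + v]) [(0 : Int)]) (y + 1) 0 -
        PySem.List.pyGetD ((pvFs (y :: rest)).foldl
            (fun p v => p ++ [PySem.List.pyGetD p (-1) 0 + v]) [(0 : Int)]) (max j (y - x + j)) 0
      else 0)]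
  rw [show pvFs (x :: y :: rest) =
        (PySem.List.pyRange 0 (x + 1) 1).map (pvW (x :: y :: rest)) from rfl]
  apply List.map_congr_left
  intro j hj
  rw [PySem.List.mem_pyRange_one] at hj
  rw [pvW, if_pos (show (0 : Int) ≤ j ∧ j ≤ x from ⟨hj.1, by omega⟩)]
  have hjle : j ≤ max j (y - x + j) := le_max_left _ _
  by_cases hlo : max j (y - x + j) ≤ y
  · have hy0 : 0 ≤ y := by omega
    have hlen : (((pvFs (y :: rest)).length : Int)) = y + 1 := by
      simp only [pvFs, List.length_map, PySem.List.length_pyRange_one]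
      omega
    rw [if_pos hlo]
    rw [prefix_get _ _ (by omega) (by omega), prefix_get _ _ (by omega) (by omega)]
    rw [List.take_of_length_le (by omega)]
    have hsplit : PySem.List.pyRange 0 (y + 1) 1 =
        PySem.List.pyRange 0 (max j (y - x + j)) 1 ++
          PySem.List.pyRange (max j (y - x + j)) (y + 1) 1 :=
      PySem.List.pyRange_one_append _ _ _ (by omega) (by omega)
    rw [show pvFs (y :: rest) = (PySem.List.pyRange 0 (y + 1) 1).map (pvW (y :: rest)) from rfl,
        hsplit, List.map_append,
        List.take_left' (by rw [List.length_map, PySem.List.length_pyRange_one]; omega),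
        List.sum_append]
    ring
  · rw [if_neg hlo, PySem.List.pyRange_one_eq_nil (by omega), List.map_nil, List.sum_nil]

theorem pvFs_single (x : Int) :
    pvFs [x] = if 0 ≤ x then List.replicate (x + 1).toNat 1 else [] := by
  by_cases hx : 0 ≤ x
  · rw [if_pos hx, show pvFs [x] = (PySem.List.pyRange 0 (x + 1) 1).map (pvW [x]) from rfl]
    rw [List.map_congr_left (fun j hj => by
      rw [PySem.List.mem_pyRange_one] at hj
      rw [show pvW [x] j = if 0 ≤ j ∧ j ≤ x then (1 : Int) else 0 from by rw [pvW],
          if_pos ⟨hj.1, by omega⟩] : ∀ j ∈ PySem.List.pyRange 0 (x + 1) 1,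
        pvW [x] j = (fun _ => (1 : Int)) j)]
    rw [List.map_const', PySem.List.length_pyRange_one]
    congr 1
    omega
  · rw [if_neg hx, show pvFs [x] = (PySem.List.pyRange 0 (x + 1) 1).map (pvW [x]) from rfl,
        PySem.List.pyRange_one_eq_nil (by omega), List.map_nil]

theorem countOfPairs1_alt_unfold (nums : List Int) (hne : nums ≠ []) :
    countOfPairs1_alt nums =
      (((PySem.List.pyRange ((nums.length : Int) - 2) (-1) (-1)).foldl
        (fun f i =>
          (PySem.List.pyRange 0 (PySem.List.pyGetD nums i 0 + 1) 1).foldl (fun g j =>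
            g ++ [if max j (PySem.List.pyGetD nums (i + 1) 0 - PySem.List.pyGetD nums i 0 + j) ≤
                      PySem.List.pyGetD nums (i + 1) 0 then
                    PySem.List.pyGetD (f.foldl
                        (fun p v => p ++ [PySem.List.pyGetD p (-1) 0 + v]) [(0 : Int)])
                      (PySem.List.pyGetD nums (i + 1) 0 + 1) 0 -
                    PySem.List.pyGetD (f.foldl
                        (fun p v => p ++ [PySem.List.pyGetD p (-1) 0 + v]) [(0 : Int)])
                      (max j (PySem.List.pyGetD nums (i + 1) 0 - PySem.List.pyGetD nums i 0 + j)) 0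
                  else 0]) [])
        (if 0 ≤ PySem.List.pyGetD nums (-1) 0 then
           List.replicate (PySem.List.pyGetD nums (-1) 0 + 1).toNat 1 else [])).foldl
        (· + ·) 0) % (10 ^ 9 + 7) := by
  rw [countOfPairs1_alt, if_neg hne]

theorem bloop (nums : List Int) :
    ∀ (c : Nat) (i0 : Int), (i0 + 1).toNat = c → i0 ≤ (nums.length : Int) - 2 →
    (PySem.List.pyRange i0 (-1) (-1)).foldl
        (fun f i =>
          (PySem.List.pyRange 0 (PySem.List.pyGetD nums i 0 + 1) 1).foldl (fun g j =>
            g ++ [if max j (PySem.List.pyGetD nums (i + 1) 0 - PySem.List.pyGetD nums i 0 + j) ≤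
                      PySem.List.pyGetD nums (i + 1) 0 then
                    PySem.List.pyGetD (f.foldl
                        (fun p v => p ++ [PySem.List.pyGetD p (-1) 0 + v]) [(0 : Int)])
                      (PySem.List.pyGetD nums (i + 1) 0 + 1) 0 -
                    PySem.List.pyGetD (f.foldl
                        (fun p v => p ++ [PySem.List.pyGetD p (-1) 0 + v]) [(0 : Int)])
                      (max j (PySem.List.pyGetD nums (i + 1) 0 - PySem.List.pyGetD nums i 0 + j)) 0
                  else 0]) [])
        (pvFs (nums.drop (i0 + 1).toNat)) = pvFs nums := by
  intro c
  induction c with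
  | zero =>
    intro i0 hc hi0
    rw [PySem.List.pyRange_neg_one_eq_nil (by omega : i0 ≤ -1)]
    simp only [List.foldl_nil]
    rw [show (i0 + 1).toNat = 0 from hc, List.drop_zero]
  | succ c ih =>
    intro i0 hc hi0
    have hi0' : 0 ≤ i0 := by omega
    have h0 : i0.toNat < nums.length := by omega
    have h1 : i0.toNat + 1 < nums.length := by omega
    rw [PySem.List.pyRange_neg_one_cons (by omega : (-1 : Int) < i0)]
    simp only [List.foldl_cons]
    have hx : PySem.List.pyGetD nums i0 0 = nums[i0.toNat] := by
      rw [PySem.List.pyGetD_of_nonneg _ _ hi0', List.getD_eq_getElem?_getD,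
          List.getElem?_eq_getElem h0, Option.getD_some]
    have hy : PySem.List.pyGetD nums (i0 + 1) 0 = nums[i0.toNat + 1] := by
      rw [PySem.List.pyGetD_of_nonneg _ _ (by omega : (0 : Int) ≤ i0 + 1),
          List.getD_eq_getElem?_getD, show (i0 + 1).toNat = i0.toNat + 1 from by omega,
          List.getElem?_eq_getElem h1, Option.getD_some]
    have hstate : nums.drop (i0 + 1).toNat =
        PySem.List.pyGetD nums (i0 + 1) 0 :: nums.drop (i0.toNat + 2) := by
      rw [hy, show (i0 + 1).toNat = i0.toNat + 1 from by omega]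
      exact (List.getElem_cons_drop h1).symm
    rw [hstate,
        bstep_spec (PySem.List.pyGetD nums i0 0) (PySem.List.pyGetD nums (i0 + 1) 0)
          (nums.drop (i0.toNat + 2))]
    have hback : (PySem.List.pyGetD nums i0 0 :: PySem.List.pyGetD nums (i0 + 1) 0 ::
        nums.drop (i0.toNat + 2)) = nums.drop i0.toNat := by
      rw [hx, hy, List.getElem_cons_drop h1, List.getElem_cons_drop h0]
    rw [hback]
    have hrec := ih (i0 - 1) (by omega) (by omega)
    rw [show ((i0 - 1) + 1).toNat = i0.toNat from by omega] at hrec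
    exact hrec

theorem countOfPairs1_alt_eq (nums : List Int) (hne : nums ≠ []) :
    countOfPairs1_alt nums = (pvFs nums).sum % (10 ^ 9 + 7) := by
  rw [countOfPairs1_alt_unfold nums hne]
  have hlen : 0 < nums.length := List.length_pos_of_ne_nil hne
  have hlast : PySem.List.pyGetD nums (-1) 0 = nums[nums.length - 1] := by
    rw [PySem.List.pyGetD_neg_one nums 0 hne, List.getLast_eq_getElem]
  have hf0 : (if 0 ≤ PySem.List.pyGetD nums (-1) 0 then
      List.replicate (PySem.List.pyGetD nums (-1) 0 + 1).toNat 1 else []) =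
      pvFs (nums.drop (((nums.length : Int) - 2) + 1).toNat) := by
    have hdropl : nums.drop (((nums.length : Int) - 2) + 1).toNat =
        [nums[nums.length - 1]] := by
      rw [show (((nums.length : Int) - 2) + 1).toNat = nums.length - 1 from by omega]
      rw [(List.getElem_cons_drop (by omega : nums.length - 1 < nums.length)).symm,
          List.drop_eq_nil_of_le (by omega)]
    rw [hdropl, pvFs_single, hlast]
  rw [hf0, bloop nums (((nums.length : Int) - 2) + 1).toNat ((nums.length : Int) - 2) rfl
      (by omega)]
  rw [← List.sum_eq_foldl]

-- ===== VERDICT (by name: the statement is the Claim_ definition above) =====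
theorem countOfPairs1_spec : Claim_equal_countOfPairs1 := by
  intro nums _
  unfold Spec_countOfPairs1
  by_cases hne : nums = []
  · subst hne; rfl
  · rw [countOfPairs1_eq nums hne, countOfPairs1_alt_eq nums hne]
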